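-- pv_equiv track=rewrite | github.com/Mimix231/sm64dx | ai_tools/insert_code.py | find_literal_matches
-- ===== SOURCE A (Python) =====
-- def find_literal_matches(text: str, anchor: str) -> list[tuple[int, int]]:
--     if anchor == "":
--         raise SystemExit("literal anchor must not be empty")
--     matches: list[tuple[int, int]] = []
--     start = 0
--     while True:
--         index = text.find(anchor, start)
--         if index < 0:
--             break
--         matches.append((index, index + len(anchor)))
--         start = index + len(anchor)
--     return matches
-- ===== SOURCE B (Python) =====
-- def find_literal_matches(text: str, anchor: str) -> list[tuple[int, int]]:
--     if anchor == "":
--         raise SystemExit("literal anchor must not be empty")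
--     parts = text.split(anchor)
--     m = len(anchor)
--     matches: list[tuple[int, int]] = []
--     pos = 0
--     for part in parts[:-1]:
--         pos += len(part)
--         matches.append((pos, pos + m))
--         pos += m
--     return matches
-- ===== Notes on version B (the rewrite author's own statement) =====
-- stated objective: alternative
-- what changed: Replaced the manual find-and-advance pointer loop with a single str.split on the anchor, reconstructing the non-overlapping spans from the cumulative lengths of the split parts.
import Mathlib
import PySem

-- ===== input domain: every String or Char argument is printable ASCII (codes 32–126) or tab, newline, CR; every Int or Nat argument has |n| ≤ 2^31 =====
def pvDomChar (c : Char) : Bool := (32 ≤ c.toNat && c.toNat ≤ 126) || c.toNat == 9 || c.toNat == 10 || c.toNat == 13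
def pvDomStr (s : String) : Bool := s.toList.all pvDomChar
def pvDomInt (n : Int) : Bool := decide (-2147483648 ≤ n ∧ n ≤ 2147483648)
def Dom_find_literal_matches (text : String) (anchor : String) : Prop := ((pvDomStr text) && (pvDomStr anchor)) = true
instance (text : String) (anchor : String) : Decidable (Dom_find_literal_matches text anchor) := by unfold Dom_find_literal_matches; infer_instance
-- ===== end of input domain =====

-- B replaces A's find-and-advance pointer loop with one split on the anchor, rebuilding the
-- spans from cumulative part lengths (objective: alternative; same exact return value on Pre_).

-- ===== PORT A =====
-- the while-True loop of A; fuel = len(text)+1 only makes the recursion total (for anchor ≠ ""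
-- the loop runs at most len(text)+1 times, so fuel never runs out on admitted inputs)
def findLoopA (text anchor : List Char) : Nat → Int → List (Int × Int) → List (Int × Int)
  | 0, _, acc => acc.reverse
  | fuel + 1, start, acc =>
    let index := PySem.Chars.findFrom text anchor start
    if index < 0 then acc.reverse
    else findLoopA text anchor fuel (index + anchor.length) ((index, index + anchor.length) :: acc)

def find_literal_matches (text : String) (anchor : String) : List (Int × Int) :=
  if anchor = "" then []   -- Python raises SystemExit here; excluded by Pre_
  else findLoopA text.toList anchor.toList (text.toList.length + 1) 0 []

-- ===== PORT B =====
def find_literal_matches_alt (text : String) (anchor : String) : List (Int × Int) :=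
  if anchor = "" then []   -- Python raises SystemExit here; excluded by Pre_
  else
    let parts := PySem.Chars.splitOn text.toList anchor.toList
    let m : Int := anchor.toList.length
    (parts.dropLast.foldl
      (fun (st : Int × List (Int × Int)) part =>
        let pos := st.1 + part.length
        (pos + m, st.2 ++ [(pos, pos + m)])) ((0 : Int), ([] : List (Int × Int)))).2

-- ===== PRECONDITION & SPEC =====
-- Pre_ excludes exactly anchor = "", where the Python A (and B) raises SystemExit.
def Pre_find_literal_matches (text : String) (anchor : String) : Prop := anchor ≠ ""
instance (text : String) (anchor : String) : Decidable (Pre_find_literal_matches text anchor) := by unfold Pre_find_literal_matches; infer_instance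
def pvWitness_find_literal_matches : String × String := ("abcabca", "bc")

def Spec_find_literal_matches (text : String) (anchor : String) (out : List (Int × Int)) : Prop := out = find_literal_matches_alt text anchor
instance (text : String) (anchor : String) (out : List (Int × Int)) : Decidable (Spec_find_literal_matches text anchor out) := by unfold Spec_find_literal_matches; infer_instance

-- ===== CLAIM (what is proved, stated in full; the proofs are below) =====
def Claim_equal_find_literal_matches : Prop := ∀ (text : String) (anchor : String), Dom_find_literal_matches text anchor → Pre_find_literal_matches text anchor → Spec_find_literal_matches text anchor (find_literal_matches text anchor)

-- ===== LEMMAS AND PROOFS =====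

-- reference list of match spans of l (positions relative to the start of l), fueled
def spansR (sep : List Char) : Nat → List Char → List (Int × Int)
  | 0, _ => []
  | fuel + 1, l =>
    let i := PySem.Chars.find l sep
    if i < 0 then []
    else (i, i + sep.length) ::
      (spansR sep fuel (l.drop (i.toNat + sep.length))).map
        (fun p => (p.1 + (i + sep.length), p.2 + (i + sep.length)))

theorem find_eq_coe (l sep : List Char) (i : Nat) (h1 : sep <+: l.drop i)
    (h2 : ∀ j < i, ¬ sep <+: l.drop j) : PySem.Chars.find l sep = i := by
  have hinf : sep <:+: l := h1.isInfix.trans (List.drop_suffix i l).isInfix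
  have h0 : 0 ≤ PySem.Chars.find l sep := (PySem.Chars.find_nonneg_iff l sep).mpr hinf
  obtain ⟨hp, hmin⟩ := PySem.Chars.find_spec h0
  have hle : (PySem.Chars.find l sep).toNat ≤ i := by
    by_contra h; exact hmin i (by omega) h1
  have hge : i ≤ (PySem.Chars.find l sep).toNat := by
    by_contra h; exact h2 _ (by omega) hp
  omega

theorem spansR_fuel_congr (sep : List Char) (hs : sep ≠ []) :
    ∀ fuel fuel' l, l.length < fuel → l.length < fuel' →
      spansR sep fuel l = spansR sep fuel' l := by
  intro fuel
  induction fuel using Nat.strong_induction_on with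
  | _ fuel ih =>
    intro fuel' l hf hf'
    obtain ⟨f, rfl⟩ : ∃ f, fuel = f + 1 := ⟨fuel - 1, by omega⟩
    obtain ⟨f', rfl⟩ : ∃ f'', fuel' = f'' + 1 := ⟨fuel' - 1, by omega⟩
    simp only [spansR]
    by_cases hneg : PySem.Chars.find l sep < 0
    · simp [hneg]
    · simp only [hneg, if_false]
      have h0 : 0 ≤ PySem.Chars.find l sep := by omega
      have hfl := PySem.Chars.find_le_length l sep
      obtain ⟨hp, _⟩ := PySem.Chars.find_spec h0
      have hm : 1 ≤ sep.length := by cases sep <;> simp_all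
      have hd : (l.drop ((PySem.Chars.find l sep).toNat + sep.length)).length ≤ l.length - 1 := by
        simp only [List.length_drop]; omega
      have hl1 : 1 ≤ l.length := by
        rcases l with _ | _
        · exfalso
          have : ¬ sep <:+: ([] : List Char) := by
            intro h; exact hs (List.eq_nil_of_infix_nil h)
          have := (PySem.Chars.find_eq_neg_one_iff [] sep).mpr this
          omega
        · simp
      rw [ih f (by omega) f' _ (by omega) (by omega)]

theorem find_cons (sep : List Char) (c : Char) (rest : List Char)
    (h : ¬ sep <+: (c :: rest)) :
    PySem.Chars.find (c :: rest) sep =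
      if PySem.Chars.find rest sep < 0 then -1 else PySem.Chars.find rest sep + 1 := by
  have hlb := PySem.Chars.neg_one_le_find rest sep
  by_cases hr : PySem.Chars.find rest sep < 0
  · have hne : PySem.Chars.find rest sep = -1 := by omega
    have hni : ¬ sep <:+: rest := (PySem.Chars.find_eq_neg_one_iff rest sep).mp hne
    have : ¬ sep <:+: (c :: rest) := by
      intro hi
      rcases List.infix_cons_iff.mp hi with hp | hi'
      · exact h hp
      · exact hni hi'
    simp [hr, (PySem.Chars.find_eq_neg_one_iff _ _).mpr this]
  · have h0 : 0 ≤ PySem.Chars.find rest sep := by omega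
    obtain ⟨hp, hmin⟩ := PySem.Chars.find_spec h0
    have := find_eq_coe (c :: rest) sep ((PySem.Chars.find rest sep).toNat + 1)
      (by simpa using hp)
      (by
        intro j hj
        match j with
        | 0 => simpa using h
        | j + 1 =>
          simp only [List.drop_succ_cons]
          exact hmin j (by omega))
    simp [hr, this]
    omega

theorem find_of_prefix (l sep : List Char) (h : sep <+: l) : PySem.Chars.find l sep = 0 := by
  have := find_eq_coe l sep 0 (by simpa using h) (by omega)
  simpa using this

theorem splitOn_go_char (sep : List Char) (hs : sep ≠ []) :
    ∀ fuel l cur acc, l.length < fuel →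
      PySem.Chars.splitOn.go sep fuel l cur acc =
        acc.reverse ++
          (if PySem.Chars.find l sep < 0 then [cur.reverse ++ l]
           else (cur.reverse ++ l.take (PySem.Chars.find l sep).toNat) ::
             PySem.Chars.splitOn (l.drop ((PySem.Chars.find l sep).toNat + sep.length)) sep) := by
  intro fuel
  induction fuel using Nat.strong_induction_on with
  | _ fuel ih =>
    intro l cur acc hf
    obtain ⟨f, rfl⟩ : ∃ f, fuel = f + 1 := ⟨fuel - 1, by omega⟩
    have hm : 1 ≤ sep.length := by cases sep <;> simp_all
    rcases l with _ | ⟨c, rest⟩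
    · have hneg : PySem.Chars.find [] sep = -1 := by
        apply (PySem.Chars.find_eq_neg_one_iff _ _).mpr
        intro h; exact hs (List.eq_nil_of_infix_nil h)
      simp [PySem.Chars.splitOn.go, hneg]
    · by_cases hpre : sep <+: (c :: rest)
      · have hgo : PySem.Chars.splitOn.go sep (f + 1) (c :: rest) cur acc =
            PySem.Chars.splitOn.go sep f (List.drop sep.length (c :: rest)) [] (cur.reverse :: acc) := by
          simp [PySem.Chars.splitOn.go, List.isPrefixOf_iff_prefix.mpr hpre]
        have hrem : (List.drop sep.length (c :: rest)).length < f := by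
          rw [List.length_drop]
          simp only [List.length_cons] at hf ⊢
          omega
        rw [hgo, ih f (by omega) _ [] (cur.reverse :: acc) hrem]
        have hsplit : PySem.Chars.splitOn (List.drop sep.length (c :: rest)) sep =
            (if PySem.Chars.find (List.drop sep.length (c :: rest)) sep < 0
             then [([] : List Char).reverse ++ List.drop sep.length (c :: rest)]
             else (([] : List Char).reverse ++ (List.drop sep.length (c :: rest)).take
                 (PySem.Chars.find (List.drop sep.length (c :: rest)) sep).toNat) ::
               PySem.Chars.splitOn ((List.drop sep.length (c :: rest)).drop
                 ((PySem.Chars.find (List.drop sep.length (c :: rest)) sep).toNat + sep.length)) sep) := by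
          have := ih ((List.drop sep.length (c :: rest)).length + 1) (by omega)
            (List.drop sep.length (c :: rest)) [] [] (by omega)
          simpa [PySem.Chars.splitOn] using this
        rw [find_of_prefix _ _ hpre]
        simp only [show ¬ ((0:Int) < 0) by omega, if_false, Int.toNat_zero, List.take_zero,
          List.append_nil, Nat.zero_add, List.reverse_cons, List.reverse_nil, List.nil_append]
        rw [hsplit]
        simp
      · have hgo : PySem.Chars.splitOn.go sep (f + 1) (c :: rest) cur acc =
            PySem.Chars.splitOn.go sep f rest (c :: cur) acc := by
          simp [PySem.Chars.splitOn.go, List.isPrefixOf_iff_prefix, hpre]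
        have hrest : rest.length < f := by simp only [List.length_cons] at hf; omega
        rw [hgo, ih f (by omega) rest (c :: cur) acc hrest]
        rw [find_cons sep c rest hpre]
        have hlb := PySem.Chars.neg_one_le_find rest sep
        by_cases hr : PySem.Chars.find rest sep < 0
        · simp [hr]
        · have h0 : (0:Int) ≤ PySem.Chars.find rest sep := by omega
          simp only [hr, if_false, show ¬ (PySem.Chars.find rest sep + 1 < 0) by omega, if_false]
          have htn : (PySem.Chars.find rest sep + 1).toNat = (PySem.Chars.find rest sep).toNat + 1 := by omega
          rw [htn]
          rw [show (PySem.Chars.find rest sep).toNat + 1 + sep.length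
              = ((PySem.Chars.find rest sep).toNat + sep.length) + 1 from by omega]
          simp [List.take_succ_cons, List.drop_succ_cons]

theorem splitOn_ne_nil (sep : List Char) (hs : sep ≠ []) (l : List Char) :
    PySem.Chars.splitOn l sep ≠ [] := by
  have := splitOn_go_char sep hs (l.length + 1) l [] [] (by omega)
  rw [PySem.Chars.splitOn, this]
  by_cases h : PySem.Chars.find l sep < 0 <;> simp [h]

theorem loopA_eq_spansR (text sep : List Char) (hs : sep ≠ []) :
    ∀ fuel (k : Nat) acc, k ≤ text.length → text.length - k < fuel →
      findLoopA text sep fuel (k : Int) acc =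
        acc.reverse ++ (spansR sep (text.length + 1) (text.drop k)).map
          (fun p => ((k : Int) + p.1, (k : Int) + p.2)) := by
  intro fuel
  induction fuel using Nat.strong_induction_on with
  | _ fuel ih =>
    intro k acc hk hf
    obtain ⟨f, rfl⟩ : ∃ f, fuel = f + 1 := ⟨fuel - 1, by omega⟩
    have hm : 1 ≤ sep.length := by cases sep <;> simp_all
    have hff := PySem.Chars.findFrom_natCast text sep k hk
    have hlb := PySem.Chars.neg_one_le_find (text.drop k) sep
    have hldk : (text.drop k).length = text.length - k := by rw [List.length_drop]
    by_cases hneg : PySem.Chars.find (text.drop k) sep = -1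
    · simp only [findLoopA, hff, hneg, if_pos]
      rw [spansR]
      simp only [hneg]
      norm_num
    · have h0 : 0 ≤ PySem.Chars.find (text.drop k) sep := by omega
      obtain ⟨hp, _⟩ := PySem.Chars.find_spec h0
      have hplen := hp.length_le
      rw [List.length_drop, List.length_drop] at hplen
      set i := PySem.Chars.find (text.drop k) sep with hi
      have hidx : ¬ ((k : Int) + i < 0) := by omega
      simp only [findLoopA, hff, hneg, if_false, hidx]
      have hcast : (k : Int) + i + (sep.length : Int) = ((k + i.toNat + sep.length : Nat) : Int) := by
        push_cast; omega
      rw [hcast]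
      set k' := k + i.toNat + sep.length with hk'
      have hk'le : k' ≤ text.length := by omega
      have hk'1 : k + 1 ≤ k' := by omega
      have hrec := ih f (by omega) k' (((k : Int) + i, ((k' : Nat) : Int)) :: acc) hk'le (by omega)
      rw [hrec]
      have hdd : (text.drop k).drop (i.toNat + sep.length) = text.drop k' := by
        rw [List.drop_drop]; congr 1; omega
      have hunf : spansR sep (text.length + 1) (text.drop k) =
          (i, i + (sep.length : Int)) ::
            (spansR sep (text.length + 1) (text.drop k')).map
              (fun p => (p.1 + (i + sep.length), p.2 + (i + sep.length))) := by
        rw [spansR]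
        simp only [hi.symm, show ¬ (i < 0) by omega, if_false, hdd]
        rw [spansR_fuel_congr sep hs text.length (text.length + 1) (text.drop k')
          (by rw [List.length_drop]; omega) (by rw [List.length_drop]; omega)]
      rw [hunf]
      simp only [List.reverse_cons, List.map_cons, List.map_map, List.append_assoc]
      congr 1
      simp only [List.cons_append, List.nil_append]
      congr 1
      · simp only [Prod.mk.injEq]
        exact ⟨trivial, by push_cast; omega⟩
      · apply List.map_congr_left
        intro p _
        simp only [Function.comp_apply, Prod.mk.injEq]
        refine ⟨by push_cast; omega, by push_cast; omega⟩

theorem foldB_eq_spansR (sep : List Char) (hs : sep ≠ []) :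
    ∀ fuel l, l.length < fuel → ∀ (p : Int) res,
      ((PySem.Chars.splitOn l sep).dropLast.foldl
        (fun (st : Int × List (Int × Int)) part =>
          let pos := st.1 + part.length
          (pos + (sep.length : Int), st.2 ++ [(pos, pos + (sep.length : Int))])) (p, res)).2 =
      res ++ (spansR sep fuel l).map (fun q => (p + q.1, p + q.2)) := by
  intro fuel
  induction fuel using Nat.strong_induction_on with
  | _ fuel ih =>
    intro l hf p res
    obtain ⟨f, rfl⟩ : ∃ f, fuel = f + 1 := ⟨fuel - 1, by omega⟩
    have hm : 1 ≤ sep.length := by cases sep <;> simp_all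
    have hchar := splitOn_go_char sep hs (l.length + 1) l [] [] (by omega)
    rw [PySem.Chars.splitOn] at *
    rw [hchar]
    have hlb := PySem.Chars.neg_one_le_find l sep
    by_cases hneg : PySem.Chars.find l sep < 0
    · simp only [hneg, if_true, spansR, List.nil_append, List.reverse_nil]
      simp [hneg]
    · have h0 : 0 ≤ PySem.Chars.find l sep := by omega
      obtain ⟨hp, _⟩ := PySem.Chars.find_spec h0
      have hplen := hp.length_le
      rw [List.length_drop] at hplen
      set i := PySem.Chars.find l sep with hi
      set rem := l.drop (i.toNat + sep.length) with hrem
      have hrnn := splitOn_ne_nil sep hs rem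
      rw [PySem.Chars.splitOn] at hrnn
      obtain ⟨z, zs, hz⟩ : ∃ z zs, PySem.Chars.splitOn.go sep (rem.length + 1) rem [] [] = z :: zs := by
        rcases h : PySem.Chars.splitOn.go sep (rem.length + 1) rem [] [] with _ | ⟨z, zs⟩
        · exact absurd h hrnn
        · exact ⟨z, zs, rfl⟩
      simp only [hneg, if_false, List.nil_append, List.reverse_nil, hz]
      rw [List.dropLast_cons₂, List.foldl_cons]
      have hrl : rem.length < f := by rw [hrem, List.length_drop]; omega
      have hrec := ih f (by omega) rem hrl (p + (l.take i.toNat).length + sep.length)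
        (res ++ [(p + (l.take i.toNat).length, p + (l.take i.toNat).length + (sep.length : Int))])
      rw [PySem.Chars.splitOn] at hrec
      rw [hz] at hrec
      simp only at hrec ⊢
      rw [hrec]
      simp only [spansR, hi.symm, hneg, if_false, List.map_cons, List.map_map]
      have htake : ((l.take i.toNat).length : Int) = i := by
        rw [List.length_take]; omega
      rw [List.append_assoc]
      congr 1
      simp only [List.cons_append, List.nil_append]
      congr 1
      · simp only [Prod.mk.injEq]
        rw [htake]
        refine ⟨rfl, by omega⟩
      · apply List.map_congr_left
        intro q _
        simp only [Function.comp_apply, Prod.mk.injEq]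
        rw [htake]
        refine ⟨by omega, by omega⟩

-- ===== VERDICT (by name: the statement is the Claim_ definition above) =====
theorem find_literal_matches_spec : Claim_equal_find_literal_matches := by
  intro text anchor hdom hpre
  show find_literal_matches text anchor = find_literal_matches_alt text anchor
  have hne : anchor ≠ "" := hpre
  have hs : anchor.toList ≠ [] := by
    intro h
    exact hne (String.toList_eq_nil_iff.mp h)
  unfold find_literal_matches find_literal_matches_alt
  simp only [if_neg hne]
  have hA := loopA_eq_spansR text.toList anchor.toList hs (text.toList.length + 1) 0 []
    (by omega) (by omega)
  simp only [Nat.cast_zero, List.drop_zero, List.reverse_nil, List.nil_append, zero_add] at hA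
  rw [hA]
  have hB := foldB_eq_spansR anchor.toList hs (text.toList.length + 1) text.toList
    (by omega) 0 []
  simp only [List.nil_append, zero_add] at hB
  rw [hB]
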